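-- pv_equiv track=rewrite | github.com/pingfury108/book2tts | src/web/workbench/views/book_views.py | parse_and_deduplicate_page_ranges
-- ===== SOURCE A (Python) =====
-- def parse_and_deduplicate_page_ranges(names_list):
--     """
--     解析页面范围并去重
--     参数:
--         names_list: 页面范围列表，如 ['1-3', '2-2', '3-4']
--     返回:
--         去重后的页面列表，按顺序排列
--     """
--     all_pages = set()
--
--     for name in names_list:
--         if '-' in name:
--             # 页面范围格式 (start-end)
--             start_page, end_page = map(int, name.split('-'))
--             for page_num in range(start_page, end_page + 1):
--                 all_pages.add(page_num)
--         else: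
--             # 单页格式
--             all_pages.add(int(name))
--
--     # 返回排序后的页面列表
--     return sorted(all_pages)
-- ===== SOURCE B (Python) =====
-- def parse_and_deduplicate_page_ranges(names_list):
--     # Interval-merge algorithm: parse each token into a (start, end) interval,
--     # drop empty intervals, sort by start, merge overlapping/adjacent intervals
--     # into maximal disjoint ones, then expand those into the result list.
--     intervals = []
--     for name in names_list:
--         if '-' in name:
--             start_page, end_page = map(int, name.split('-'))
--         else:
--             start_page = end_page = int(name)
--         if start_page <= end_page:
--             intervals.append((start_page, end_page))
--     intervals.sort(key=lambda iv: iv[0])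
--     merged = []
--     for s, e in intervals:
--         if merged and s <= merged[-1][1] + 1:
--             if e > merged[-1][1]:
--                 merged[-1] = (merged[-1][0], e)
--         else:
--             merged.append((s, e))
--     result = []
--     for s, e in merged:
--         result.extend(range(s, e + 1))
--     return result
-- ===== Notes on version B (the rewrite author's own statement) =====
-- stated objective: alternative
-- what changed: Replaces the page-by-page hash-set accumulation plus sorted() with an interval-merge algorithm: tokens become (start,end) intervals, empty ones are dropped, intervals are sorted by start and merged into maximal disjoint intervals, which are then expanded once into the result.
import Mathlib
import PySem

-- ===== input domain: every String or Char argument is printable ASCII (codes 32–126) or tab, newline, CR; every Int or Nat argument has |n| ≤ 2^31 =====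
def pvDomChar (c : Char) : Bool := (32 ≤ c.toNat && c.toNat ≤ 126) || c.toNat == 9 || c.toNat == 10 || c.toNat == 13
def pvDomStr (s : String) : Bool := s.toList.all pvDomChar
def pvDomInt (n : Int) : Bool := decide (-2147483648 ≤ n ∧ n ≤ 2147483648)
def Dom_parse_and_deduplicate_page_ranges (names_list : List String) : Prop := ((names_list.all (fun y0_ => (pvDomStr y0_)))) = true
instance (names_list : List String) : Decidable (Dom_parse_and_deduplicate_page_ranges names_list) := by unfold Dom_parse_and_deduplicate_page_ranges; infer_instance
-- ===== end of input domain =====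

-- B replaces A's page-by-page set accumulation + sorted() by an interval-merge algorithm
-- (parse tokens to intervals, sort by start, merge, expand); objective: alternative,
-- return values proved equal.

-- ===== PORT A =====
-- name.split('-'); the getD is unreachable ("-" is not the empty separator)
def pvParts (name : String) : List String := (PySem.Str.split? name "-").getD []

-- pages contributed by one token of A: '-' in name → ints around '-', range(start, end+1);
-- else a single int; none = ValueError
def pvTokenPages (name : String) : Option (List Int) :=
  if PySem.Str.isIn "-" name then
    match pvParts name with
    | [a, b] =>
      match PySem.Int.ofStr? a, PySem.Int.ofStr? b with
      | some s, some e => some (PySem.List.pyRange s (e + 1) 1)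
      | _, _ => none
    | _ => none
  else
    (PySem.Int.ofStr? name).map (fun n => [n])

def parse_and_deduplicate_page_ranges (names_list : List String) : List Int :=
  let all_pages : PySem.Set Int :=
    names_list.foldl (fun s name => PySem.Set.update s ((pvTokenPages name).getD []))
      PySem.Set.empty
  PySem.List.sorted all_pages (fun x => x) false

-- ===== PORT B =====
-- the (start_page, end_page) interval one token of B parses to (same parsing lines)
def pvTokenInterval (name : String) : Option (Int × Int) :=
  if PySem.Str.isIn "-" name then
    match pvParts name with
    | [a, b] =>
      match PySem.Int.ofStr? a, PySem.Int.ofStr? b with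
      | some s, some e => some (s, e)
      | _, _ => none
    | _ => none
  else
    (PySem.Int.ofStr? name).map (fun n => (n, n))

-- B's merge-loop body; merged is kept REVERSED (head = Python's merged[-1]), which ports
-- the in-place 'merged[-1] = (merged[-1][0], e)' update as a head replacement
def pvMergeStep (merged : List (Int × Int)) (iv : Int × Int) : List (Int × Int) :=
  match merged with
  | (ms, me) :: rest =>
      if iv.1 ≤ me + 1 then
        if iv.2 > me then (ms, iv.2) :: rest else (ms, me) :: rest
      else iv :: (ms, me) :: rest
  | [] => [iv]

def parse_and_deduplicate_page_ranges_alt (names_list : List String) : List Int :=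
  let intervals : List (Int × Int) :=
    names_list.foldl (fun acc name =>
      match pvTokenInterval name with
      | some iv => if iv.1 ≤ iv.2 then acc ++ [iv] else acc
      | none => acc) []
  let sortedIv := PySem.List.sorted intervals (fun iv => iv.1) false
  let merged := (sortedIv.foldl pvMergeStep []).reverse
  merged.foldl (fun r iv => r ++ PySem.List.pyRange iv.1 (iv.2 + 1) 1) []

-- ===== PRECONDITION & SPEC =====
-- Pre_: exactly the inputs where the Python raises no ValueError: every token with '-'
-- splits into exactly two int-parsable parts, every other token is int-parsable.
def Pre_parse_and_deduplicate_page_ranges (names_list : List String) : Prop :=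
  ∀ name ∈ names_list,
    if PySem.Str.isIn "-" name then
      (pvParts name).length = 2 ∧
        ∀ p ∈ pvParts name, (PySem.Int.ofStr? p).isSome
    else (PySem.Int.ofStr? name).isSome
instance (names_list : List String) : Decidable (Pre_parse_and_deduplicate_page_ranges names_list) := by
  unfold Pre_parse_and_deduplicate_page_ranges; infer_instance

def pvWitness_parse_and_deduplicate_page_ranges : List String := ["1-3", "2-2", "4"]

def Spec_parse_and_deduplicate_page_ranges (names_list : List String) (out : List Int) : Prop := out = parse_and_deduplicate_page_ranges_alt names_list
instance (names_list : List String) (out : List Int) : Decidable (Spec_parse_and_deduplicate_page_ranges names_list out) := by unfold Spec_parse_and_deduplicate_page_ranges; infer_instance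

-- ===== CLAIM (what is proved, stated in full; the proofs are below) =====
def Claim_equal_parse_and_deduplicate_page_ranges : Prop := ∀ (names_list : List String), Dom_parse_and_deduplicate_page_ranges names_list → Pre_parse_and_deduplicate_page_ranges names_list → Spec_parse_and_deduplicate_page_ranges names_list (parse_and_deduplicate_page_ranges names_list)

-- ===== LEMMAS AND PROOFS =====

theorem pv_witness_ok :
    Dom_parse_and_deduplicate_page_ranges pvWitness_parse_and_deduplicate_page_ranges ∧
    Pre_parse_and_deduplicate_page_ranges pvWitness_parse_and_deduplicate_page_ranges := by
  decide

-- A's set-building loop is set(flatMap of per-token pages)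
theorem pv_foldl_update (l : List String) (s : PySem.Set Int) :
    l.foldl (fun s name => PySem.Set.update s ((pvTokenPages name).getD [])) s
      = PySem.Set.update s (l.flatMap fun n => (pvTokenPages n).getD []) := by
  induction l generalizing s with
  | nil => simp [PySem.Set.update]
  | cons a l ih =>
    simp only [List.foldl_cons, List.flatMap_cons]
    rw [ih, PySem.Set.update_append]

-- a token's pages are exactly the integers its interval contains
theorem pv_token_mem (name : String) (z : Int) :
    z ∈ (pvTokenPages name).getD []
      ↔ ∃ iv, pvTokenInterval name = some iv ∧ iv.1 ≤ z ∧ z ≤ iv.2 := by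
  unfold pvTokenPages pvTokenInterval
  by_cases h : PySem.Str.isIn "-" name
  · simp only [if_pos h]
    cases hp : pvParts name with
    | nil => simp
    | cons a t =>
      cases t with
      | nil => simp
      | cons b t2 =>
        cases t2 with
        | cons c t3 => simp
        | nil =>
          cases ha : PySem.Int.ofStr? a with
          | none => simp [ha]
          | some s =>
            cases hb : PySem.Int.ofStr? b with
            | none => simp [ha, hb]
            | some e =>
              simp only [ha, hb, Option.getD_some, PySem.List.mem_pyRange_one,
                Option.some.injEq]
              constructor
              · intro hz; exact ⟨(s, e), rfl, by simp; omega⟩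
              · rintro ⟨iv, hiv, h1, h2⟩; subst hiv; simp at h1 h2 ⊢; omega
  · simp only [if_neg h]
    cases hn : PySem.Int.ofStr? name with
    | none => simp
    | some n =>
      simp only [Option.map_some, Option.getD_some, List.mem_singleton, Option.some.injEq]
      constructor
      · intro hz; exact ⟨(n, n), rfl, by omega⟩
      · rintro ⟨iv, hiv, h1, h2⟩; subst hiv; simp at h1 h2; omega

-- B's interval-collecting loop is a filtered filterMap
theorem pv_intervals_eq (l : List String) (acc : List (Int × Int)) :
    l.foldl (fun acc name =>
        match pvTokenInterval name with
        | some iv => if iv.1 ≤ iv.2 then acc ++ [iv] else acc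
        | none => acc) acc
      = acc ++ (l.filterMap pvTokenInterval).filter (fun iv => decide (iv.1 ≤ iv.2)) := by
  induction l generalizing acc with
  | nil => simp
  | cons a l ih =>
    simp only [List.foldl_cons, List.filterMap_cons]
    cases h : pvTokenInterval a with
    | none => dsimp only; rw [ih]
    | some iv =>
      dsimp only
      by_cases hiv : iv.1 ≤ iv.2
      · rw [if_pos hiv, ih, List.filter_cons, if_pos (by simpa using hiv)]
        simp
      · rw [if_neg hiv, ih, List.filter_cons, if_neg (by simpa using hiv)]

-- merge-loop invariant: the reversed accumulator stays a chain of nonempty, separated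
-- intervals covering exactly what was fed in
theorem pv_merge_go (ins : List (Int × Int)) (acc : List (Int × Int))
    (hins : ins.Pairwise (fun a b => a.1 ≤ b.1))
    (hins_ne : ∀ p ∈ ins, p.1 ≤ p.2)
    (hacc : acc.Pairwise (fun a b => b.2 + 2 ≤ a.1))
    (hacc_ne : ∀ p ∈ acc, p.1 ≤ p.2)
    (hhead : ∀ h ∈ acc.head?, ∀ p ∈ ins, h.1 ≤ p.1) :
    (ins.foldl pvMergeStep acc).Pairwise (fun a b => b.2 + 2 ≤ a.1) ∧
    (∀ p ∈ ins.foldl pvMergeStep acc, p.1 ≤ p.2) ∧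
    (∀ z, (∃ p ∈ ins.foldl pvMergeStep acc, p.1 ≤ z ∧ z ≤ p.2)
        ↔ (∃ p ∈ acc, p.1 ≤ z ∧ z ≤ p.2) ∨ (∃ p ∈ ins, p.1 ≤ z ∧ z ≤ p.2)) := by
  induction ins generalizing acc with
  | nil => exact ⟨hacc, hacc_ne, by simp⟩
  | cons iv rest ih =>
    obtain ⟨hiv_le, hrest⟩ := List.pairwise_cons.mp hins
    have hiv_ne : iv.1 ≤ iv.2 := hins_ne iv List.mem_cons_self
    have hrest_ne : ∀ p ∈ rest, p.1 ≤ p.2 := fun p hp => hins_ne p (List.mem_cons_of_mem _ hp)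
    simp only [List.foldl_cons]
    cases acc with
    | nil =>
      have step : pvMergeStep [] iv = [iv] := rfl
      rw [step]
      obtain ⟨h1, h2, h3⟩ := ih [iv] hrest hrest_ne (by simp)
        (by intro p hp; simp at hp; subst hp; exact hiv_ne)
        (by intro h hh p hp; simp at hh; subst hh; exact hiv_le p hp)
      refine ⟨h1, h2, ?_⟩
      intro z
      rw [h3 z]
      simp only [List.mem_cons, List.not_mem_nil]
      constructor
      · rintro (⟨p, hp, hc⟩ | h)
        · simp at hp; subst hp; exact Or.inr ⟨_, Or.inl rfl, hc⟩
        · obtain ⟨p, hp, hc⟩ := h; exact Or.inr ⟨p, Or.inr hp, hc⟩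
      · rintro (⟨p, hp, hc⟩ | ⟨p, hp, hc⟩)
        · exact absurd hp (by simp)
        · rcases hp with rfl | hp
          · exact Or.inl ⟨p, by simp, hc⟩
          · exact Or.inr ⟨p, hp, hc⟩
    | cons hd restAcc =>
      obtain ⟨ms, me⟩ := hd
      have hms_le : ms ≤ iv.1 := hhead (ms, me) (by simp) iv List.mem_cons_self
      have hms_me : ms ≤ me := hacc_ne (ms, me) List.mem_cons_self
      obtain ⟨hsep, hrestAcc⟩ := List.pairwise_cons.mp hacc
      by_cases hm : iv.1 ≤ me + 1
      · by_cases he : iv.2 > me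
        · have step : pvMergeStep ((ms, me) :: restAcc) iv = (ms, iv.2) :: restAcc := by
            simp [pvMergeStep, hm, he]
          rw [step]
          have hchain : ((ms, iv.2) :: restAcc).Pairwise (fun a b => b.2 + 2 ≤ a.1) :=
            List.pairwise_cons.mpr ⟨fun b hb => hsep b hb, hrestAcc⟩
          have hne : ∀ p ∈ (ms, iv.2) :: restAcc, p.1 ≤ p.2 := by
            intro p hp
            rcases List.mem_cons.mp hp with rfl | hp
            · exact le_trans hms_me (le_of_lt he)
            · exact hacc_ne p (List.mem_cons_of_mem _ hp)
          obtain ⟨h1, h2, h3⟩ := ih _ hrest hrest_ne hchain hne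
            (by intro h hh p hp; simp at hh; subst hh; exact le_trans hms_le (hiv_le p hp))
          refine ⟨h1, h2, ?_⟩
          intro z
          rw [h3 z]
          constructor
          · rintro (⟨p, hp, hc⟩ | h)
            · rcases List.mem_cons.mp hp with rfl | hp
              · -- z ∈ [ms, iv.2]: either z ≤ me (old head) or z ∈ [iv.1, iv.2]
                by_cases hz : z ≤ me
                · exact Or.inl ⟨(ms, me), List.mem_cons_self, hc.1, hz⟩
                · exact Or.inr ⟨iv, List.mem_cons_self, by omega, hc.2⟩
              · exact Or.inl ⟨p, List.mem_cons_of_mem _ hp, hc⟩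
            · obtain ⟨p, hp, hc⟩ := h
              exact Or.inr ⟨p, List.mem_cons_of_mem _ hp, hc⟩
          · rintro (⟨p, hp, hc⟩ | ⟨p, hp, hc⟩)
            · rcases List.mem_cons.mp hp with rfl | hp
              · exact Or.inl ⟨(ms, iv.2), List.mem_cons_self, hc.1, by omega⟩
              · exact Or.inl ⟨p, List.mem_cons_of_mem _ hp, hc⟩
            · rcases List.mem_cons.mp hp with rfl | hp
              · exact Or.inl ⟨(ms, p.2), List.mem_cons_self, le_trans hms_le hc.1, hc.2⟩
              · exact Or.inr ⟨p, hp, hc⟩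
        · have step : pvMergeStep ((ms, me) :: restAcc) iv = (ms, me) :: restAcc := by
            simp [pvMergeStep, hm, he]
          rw [step]
          obtain ⟨h1, h2, h3⟩ := ih _ hrest hrest_ne hacc hacc_ne
            (by intro h hh p hp; simp at hh; subst hh; exact le_trans hms_le (hiv_le p hp))
          refine ⟨h1, h2, ?_⟩
          intro z
          rw [h3 z]
          constructor
          · rintro (h | ⟨p, hp, hc⟩)
            · exact Or.inl h
            · exact Or.inr ⟨p, List.mem_cons_of_mem _ hp, hc⟩
          · rintro (h | ⟨p, hp, hc⟩)
            · exact Or.inl h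
            · rcases List.mem_cons.mp hp with rfl | hp
              · exact Or.inl ⟨(ms, me), List.mem_cons_self, by omega⟩
              · exact Or.inr ⟨p, hp, hc⟩
      · have step : pvMergeStep ((ms, me) :: restAcc) iv = iv :: (ms, me) :: restAcc := by
          simp [pvMergeStep, hm]
        rw [step]
        have hchain : (iv :: (ms, me) :: restAcc).Pairwise (fun a b => b.2 + 2 ≤ a.1) := by
          refine List.pairwise_cons.mpr ⟨?_, hacc⟩
          intro b hb
          rcases List.mem_cons.mp hb with rfl | hb
          · omega
          · have := hsep b hb; omega
        have hne : ∀ p ∈ iv :: (ms, me) :: restAcc, p.1 ≤ p.2 := by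
          intro p hp
          rcases List.mem_cons.mp hp with rfl | hp
          · exact hiv_ne
          · exact hacc_ne p hp
        obtain ⟨h1, h2, h3⟩ := ih _ hrest hrest_ne hchain hne
          (by intro h hh p hp; simp at hh; subst hh; exact hiv_le p hp)
        refine ⟨h1, h2, ?_⟩
        intro z
        rw [h3 z]
        constructor
        · rintro (⟨p, hp, hc⟩ | ⟨p, hp, hc⟩)
          · rcases List.mem_cons.mp hp with rfl | hp
            · exact Or.inr ⟨p, List.mem_cons_self, hc⟩
            · exact Or.inl ⟨p, hp, hc⟩
          · exact Or.inr ⟨p, List.mem_cons_of_mem _ hp, hc⟩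
        · rintro (⟨p, hp, hc⟩ | ⟨p, hp, hc⟩)
          · exact Or.inl ⟨p, List.mem_cons_of_mem _ hp, hc⟩
          · rcases List.mem_cons.mp hp with rfl | hp
            · exact Or.inl ⟨p, List.mem_cons_self, hc⟩
            · exact Or.inr ⟨p, hp, hc⟩

-- expansion of a separated chain of nonempty intervals: strictly increasing, covers the union
theorem pv_expand (L : List (Int × Int))
    (hchain : L.Pairwise (fun a b => a.2 + 2 ≤ b.1))
    (hne : ∀ p ∈ L, p.1 ≤ p.2) :
    (L.flatMap (fun iv => PySem.List.pyRange iv.1 (iv.2 + 1) 1)).Pairwise (· < ·) ∧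
    ∀ z, z ∈ L.flatMap (fun iv => PySem.List.pyRange iv.1 (iv.2 + 1) 1)
        ↔ ∃ p ∈ L, p.1 ≤ z ∧ z ≤ p.2 := by
  induction L with
  | nil => simp
  | cons a t ih =>
    obtain ⟨ha, ht⟩ := List.pairwise_cons.mp hchain
    obtain ⟨h1, h2⟩ := ih ht (fun p hp => hne p (List.mem_cons_of_mem _ hp))
    simp only [List.flatMap_cons]
    constructor
    · refine List.pairwise_append.mpr ⟨PySem.List.pairwise_lt_pyRange_one _ _, h1, ?_⟩
      intro x hx y hy
      rw [PySem.List.mem_pyRange_one] at hx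
      obtain ⟨p, hp, hc⟩ := (h2 y).mp hy
      have := ha p hp
      omega
    · intro z
      rw [List.mem_append, PySem.List.mem_pyRange_one, h2]
      constructor
      · rintro (h | ⟨p, hp, hc⟩)
        · exact ⟨a, List.mem_cons_self, by omega⟩
        · exact ⟨p, List.mem_cons_of_mem _ hp, hc⟩
      · rintro ⟨p, hp, hc⟩
        rcases List.mem_cons.mp hp with rfl | hp
        · exact Or.inl (by omega)
        · exact Or.inr ⟨p, hp, hc⟩

-- ===== VERDICT (by name: the statement is the Claim_ definition above) =====
theorem parse_and_deduplicate_page_ranges_spec : Claim_equal_parse_and_deduplicate_page_ranges := by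
  intro names_list _ _
  show parse_and_deduplicate_page_ranges names_list = parse_and_deduplicate_page_ranges_alt names_list
  unfold parse_and_deduplicate_page_ranges parse_and_deduplicate_page_ranges_alt
  rw [pv_foldl_update, pv_intervals_eq]
  simp only [List.nil_append]
  set F := names_list.flatMap (fun n => (pvTokenPages n).getD []) with hF
  set I := (names_list.filterMap pvTokenInterval).filter (fun iv => decide (iv.1 ≤ iv.2)) with hI
  set S := PySem.List.sorted I (fun iv => iv.1) false with hS
  -- hypotheses of the merge lemma for S
  have hS_sorted : S.Pairwise (fun a b => a.1 ≤ b.1) :=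
    PySem.List.sorted_pairwise I (fun iv => iv.1)
  have hS_ne : ∀ p ∈ S, p.1 ≤ p.2 := by
    intro p hp
    rw [hS, PySem.List.mem_sorted] at hp
    have := List.of_mem_filter (hI ▸ hp)
    simpa using this
  obtain ⟨hchain, hne, hcov⟩ := pv_merge_go S [] hS_sorted hS_ne (by simp) (by simp) (by simp)
  set M := (S.foldl pvMergeStep []).reverse with hM
  have hMchain : M.Pairwise (fun a b => a.2 + 2 ≤ b.1) := by
    rw [hM, List.pairwise_reverse]; exact hchain
  have hMne : ∀ p ∈ M, p.1 ≤ p.2 := by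
    intro p hp; exact hne p (by simpa [hM] using hp)
  obtain ⟨hlt, hmem⟩ := pv_expand M hMchain hMne
  rw [PySem.List.foldl_append_eq_flatMap]
  -- membership of the expansion equals membership of set(F)
  have hmem' : ∀ z, z ∈ M.flatMap (fun iv => PySem.List.pyRange iv.1 (iv.2 + 1) 1)
      ↔ z ∈ PySem.Set.ofList F := by
    intro z
    rw [hmem z, PySem.Set.mem_ofList]
    constructor
    · rintro ⟨p, hp, hc⟩
      have hq : ∃ q ∈ S, q.1 ≤ z ∧ z ≤ q.2 :=
        ((hcov z).mp ⟨p, by simpa [hM] using hp, hc⟩).resolve_left (by simp)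
      obtain ⟨q, hq, hqc⟩ := hq
      rw [hS, PySem.List.mem_sorted, hI, List.mem_filter, List.mem_filterMap] at hq
      obtain ⟨⟨n, hn, hqn⟩, _⟩ := hq
      rw [hF, List.mem_flatMap]
      exact ⟨n, hn, (pv_token_mem n z).mpr ⟨q, hqn, hqc⟩⟩
    · intro hz
      rw [hF, List.mem_flatMap] at hz
      obtain ⟨n, hn, hzn⟩ := hz
      obtain ⟨iv, hiv, hc⟩ := (pv_token_mem n z).mp hzn
      have hivS : iv ∈ S := by
        rw [hS, PySem.List.mem_sorted, hI, List.mem_filter]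
        exact ⟨List.mem_filterMap.mpr ⟨n, hn, hiv⟩, by simp; omega⟩
      have := (hcov z).mpr (Or.inr ⟨iv, hivS, hc⟩)
      obtain ⟨p, hp, hpc⟩ := this
      exact ⟨p, by simpa [hM] using hp, hpc⟩
  have hperm := (List.perm_ext_iff_of_nodup (hlt.imp fun h => ne_of_lt h)
    (PySem.Set.nodup_ofList F)).mpr hmem'
  exact PySem.List.sorted_eq_of_perm_of_pairwise_lt _ _ (fun x => x) hperm (by simpa using hlt)
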